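-- pv_equiv track=rewrite | github.com/EpsilonBrain/MyWebsitePython | pack/Nonogram_Code.py | row_reader
-- ===== SOURCE A (Python) =====
-- def row_reader(row):
--     # takes in a row and looks at how many groups there are
--     # probably a lot of the code in is_done will help
--     m = len(row)
--     cur_group_info = []
--     # find the first * and store that
--     star_count = row.count("*")
--     # make sure there are actually stars
--     if star_count == 0:
--         return [0]
--     else:
--         # find the first place a star occurs
--         star_ind = row.index("*")
--         # fill out cur_group_info with j as the runnning index
--         # initialize running total to count the total number of stars
--         run_total = 0
--         while star_ind < m:
--             # run groupsize to count the number of stars in a group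
--             # put this number into cur_group_info
--             size = OG_groupsize(star_ind, row)
--             cur_group_info.append(size)
--             # increase the running total to make sure we don't get too big
--             run_total += size
--             # move star index over to the next star after this group ends
--             if run_total == star_count:
--                 break
--             else:
--                 star_ind = row.index("*", star_ind + size)
--         return cur_group_info
--
-- def OG_groupsize(start, row):
--     dim = len(row)
--     star_ind = row.index("*", start)
--     i = star_ind
--     while row[i] == "*":
--         i += 1
--         if i >= dim:
--             break
--     return i - star_ind
-- ===== SOURCE B (Python) =====
-- def row_reader(row):
--     # single left-to-right scan: collect run lengths of '*' groups
--     groups = []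
--     run = 0
--     for ch in row:
--         if ch == "*":
--             run += 1
--         elif run != 0:
--             groups.append(run)
--             run = 0
--     if run != 0:
--         groups.append(run)
--     return groups if groups else [0]
-- ===== Notes on version B (the rewrite author's own statement) =====
-- stated objective: simpler
-- what changed: Replaced A's count/index-jumping (with the OG_groupsize helper re-scanning via row.index) by one linear pass keeping a current run-length counter that is flushed at each group end, returning [0] when no group was collected.
import Mathlib
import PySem

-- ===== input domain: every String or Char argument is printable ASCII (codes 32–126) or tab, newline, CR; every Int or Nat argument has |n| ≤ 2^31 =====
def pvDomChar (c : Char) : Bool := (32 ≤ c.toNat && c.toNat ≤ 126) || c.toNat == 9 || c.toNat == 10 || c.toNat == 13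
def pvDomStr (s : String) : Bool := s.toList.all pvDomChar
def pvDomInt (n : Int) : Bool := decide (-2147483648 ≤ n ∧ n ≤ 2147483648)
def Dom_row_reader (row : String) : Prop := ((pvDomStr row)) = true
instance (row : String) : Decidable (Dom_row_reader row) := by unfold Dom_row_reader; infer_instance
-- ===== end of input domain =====

-- B replaces A's count/index jumping (with the OG_groupsize helper) by one linear scan
-- keeping a run-length counter; objective: simpler.


-- ===== PORT A =====
-- while row[i] == "*": i += 1; if i >= dim: break   (the bound check makes it total; Python
-- only reaches i = dim via the inner break, where it returns the same i)
def OG_scan (cs : List Char) (i : Nat) : Nat :=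
  if h : i < cs.length then
    if cs[i] = '*' then OG_scan cs (i + 1) else i
  else i
termination_by cs.length - i

-- OG_groupsize(start, row); row.index("*", start) ported with PySem.Chars.findFrom
-- (.toNat of the unreachable -1 case; A never calls it when no star follows)
def OG_groupsize (start : Nat) (cs : List Char) : Nat :=
  let star_ind := (PySem.Chars.findFrom cs ['*'] (start : Int)).toNat
  OG_scan cs star_ind - star_ind

-- the while loop of row_reader; fuel = len(row)+1 only makes the recursion total:
-- star_ind strictly increases each iteration, so the fuel is never exhausted
def row_loop (cs : List Char) (star_count : Nat) (fuel : Nat) (star_ind : Nat)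
    (run_total : Nat) (acc : List Int) : List Int :=
  match fuel with
  | 0 => acc
  | fuel + 1 =>
    if star_ind < cs.length then
      let size := OG_groupsize star_ind cs
      let acc' := acc ++ [(size : Int)]
      let run_total' := run_total + size
      if run_total' = star_count then acc'
      else row_loop cs star_count fuel
        ((PySem.Chars.findFrom cs ['*'] ((star_ind + size : Nat) : Int)).toNat) run_total' acc'
    else acc

def row_reader (row : String) : List Int :=
  let cs := row.toList
  let star_count := PySem.Chars.count cs ['*']
  if star_count = 0 then [0]
  else
    let star_ind := (PySem.Chars.find cs ['*']).toNat
    row_loop cs star_count (cs.length + 1) star_ind 0 []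

-- ===== PORT B =====
def pvStep (st : List Int × Int) (ch : Char) : List Int × Int :=
  if ch = '*' then (st.1, st.2 + 1)
  else if st.2 ≠ 0 then (st.1 ++ [st.2], 0) else st

def row_reader_alt (row : String) : List Int :=
  let p := row.toList.foldl pvStep ([], 0)
  let groups := if p.2 ≠ 0 then p.1 ++ [p.2] else p.1
  if groups = [] then [0] else groups

-- ===== PRECONDITION & SPEC =====
def Spec_row_reader (row : String) (out : List Int) : Prop := out = row_reader_alt row
instance (row : String) (out : List Int) : Decidable (Spec_row_reader row out) := by unfold Spec_row_reader; infer_instance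

-- ===== CLAIM (what is proved, stated in full; the proofs are below) =====
def Claim_equal_row_reader : Prop := ∀ (row : String), Dom_row_reader row → Spec_row_reader row (row_reader row)

-- ===== LEMMAS AND PROOFS =====

-- generic: dropWhile is drop of the takeWhile length
theorem pvDropWhile_eq_drop (p : Char → Bool) (cs : List Char) :
    cs.dropWhile p = cs.drop (cs.takeWhile p).length := by
  induction cs with
  | nil => rfl
  | cons c t ih =>
    by_cases hc : p c
    · simp [List.dropWhile_cons, List.takeWhile_cons, hc, ih]
    · simp [List.dropWhile_cons, List.takeWhile_cons, hc]

theorem pv_tw_pos (cs : List Char) (h : '*' ∈ cs) :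
    1 ≤ ((cs.dropWhile (· ≠ '*')).takeWhile (· = '*')).length := by
  induction cs with
  | nil => simp at h
  | cons c t ih =>
    by_cases hc : c = '*'
    · subst hc; simp [List.takeWhile_cons]
    · have ht : '*' ∈ t := by
        rcases List.mem_cons.mp h with h1 | h1
        · exact absurd h1.symm hc
        · exact h1
      simpa [List.dropWhile_cons, hc] using ih ht

-- canonical description: the run lengths of '*'-groups of cs
def pvGroups (cs : List Char) : List Int :=
  if h : '*' ∈ cs then
    let s := cs.dropWhile (· ≠ '*')
    ((s.takeWhile (· = '*')).length : Int) :: pvGroups (s.drop (s.takeWhile (· = '*')).length)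
  else []
termination_by cs.length
decreasing_by
  · have h1 := pv_tw_pos cs h
    have h2 : (cs.dropWhile (· ≠ '*')).length ≤ cs.length := List.length_dropWhile_le _ _
    have h3 : 0 < cs.length := List.length_pos_of_mem h
    simp only [List.length_drop]
    omega

def pvTW (cs : List Char) : Nat := (cs.takeWhile (· = '*')).length

theorem pvGroups_nil_of_not_mem (cs : List Char) (h : '*' ∉ cs) : pvGroups cs = [] := by
  rw [pvGroups]; simp [h]

theorem pvGroups_ne_nil (cs : List Char) (h : '*' ∈ cs) : pvGroups cs ≠ [] := by
  rw [pvGroups]; simp [h]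

theorem pvGroups_cons_of_ne (c : Char) (t : List Char) (hc : c ≠ '*') :
    pvGroups (c :: t) = pvGroups t := by
  by_cases ht : '*' ∈ t
  · have hmem : '*' ∈ c :: t := List.mem_cons_of_mem _ ht
    rw [pvGroups, pvGroups]
    simp [hmem, ht, List.dropWhile_cons, hc]
  · have hmem : '*' ∉ c :: t := by
      simp only [List.mem_cons, not_or]
      exact ⟨fun h => hc h.symm, ht⟩
    rw [pvGroups_nil_of_not_mem _ hmem, pvGroups_nil_of_not_mem _ ht]

theorem pvGroups_cons_star (t : List Char) :
    pvGroups ('*' :: t) = ((1 + pvTW t : Nat) : Int) :: pvGroups (t.drop (pvTW t)) := by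
  have hmem : '*' ∈ '*' :: t := List.mem_cons_self ..
  rw [pvGroups]
  simp [hmem, List.dropWhile_cons, List.takeWhile_cons, pvTW, Nat.add_comm]
  congr 1
  rw [Nat.add_comm, List.drop_succ_cons]

theorem pvGroups_dropWhile (cs : List Char) :
    pvGroups (cs.dropWhile (· ≠ '*')) = pvGroups cs := by
  induction cs with
  | nil => rfl
  | cons c t ih =>
    by_cases hc : c = '*'
    · subst hc; simp [List.dropWhile_cons]
    · have hd : (c :: t).dropWhile (· ≠ '*') = t.dropWhile (· ≠ '*') := by
        simp [List.dropWhile_cons, hc]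
      rw [hd, ih, pvGroups_cons_of_ne _ _ hc]

-- count bookkeeping ------------------------------------------------------
theorem pvMem_dropWhile (s : List Char) (h : '*' ∈ s) :
    '*' ∈ s.dropWhile (· ≠ '*') ∧ (s.dropWhile (· ≠ '*')).count '*' = s.count '*' := by
  induction s with
  | nil => simp at h
  | cons c t ih =>
    by_cases hc : c = '*'
    · subst hc; simp [List.dropWhile_cons]
    · have ht : '*' ∈ t := by
        rcases List.mem_cons.mp h with h1 | h1
        · exact absurd h1.symm hc
        · exact h1
      have hd : (c :: t).dropWhile (· ≠ '*') = t.dropWhile (· ≠ '*') := by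
        simp [List.dropWhile_cons, hc]
      refine ⟨by rw [hd]; exact (ih ht).1, ?_⟩
      rw [hd, (ih ht).2]
      simp [List.count_cons, hc, Ne.symm hc]

theorem pvDropWhile_cons_star (s : List Char) (h : '*' ∈ s) :
    ∃ t, s.dropWhile (· ≠ '*') = '*' :: t := by
  induction s with
  | nil => simp at h
  | cons c t ih =>
    by_cases hc : c = '*'
    · subst hc; exact ⟨t, by simp [List.dropWhile_cons]⟩
    · have ht : '*' ∈ t := by
        rcases List.mem_cons.mp h with h1 | h1
        · exact absurd h1.symm hc
        · exact h1
      simpa [List.dropWhile_cons, hc] using ih ht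

theorem pvDrop_cons (cs : List Char) (k : Nat) (hk : k < cs.length) (hs : cs[k] = '*') :
    cs.drop k = '*' :: cs.drop (k + 1) := by
  rw [List.drop_eq_getElem_cons hk, hs]

theorem pvDrop_head (cs : List Char) (k : Nat) (t : List Char)
    (h : cs.drop k = '*' :: t) : k < cs.length ∧ cs[k]'(by
      have := congrArg List.length h
      simp only [List.length_drop, List.length_cons] at this
      omega) = '*' := by
  have hlen : k < cs.length := by
    have := congrArg List.length h
    simp only [List.length_drop, List.length_cons] at this
    omega
  refine ⟨hlen, ?_⟩
  have := List.drop_eq_getElem_cons hlen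
  rw [h] at this
  exact (List.cons.injEq .. ▸ this).1.symm

theorem pvCount_split (s : List Char) :
    s.count '*' = pvTW s + (s.drop (pvTW s)).count '*' := by
  conv_lhs => rw [← List.takeWhile_append_dropWhile (p := (· = '*')) (l := s)]
  rw [List.count_append, pvDropWhile_eq_drop]
  have : (s.takeWhile (· = '*')).count '*' = (s.takeWhile (· = '*')).length := by
    rw [List.count_eq_length]
    intro b hb
    have hb' : b = '*' := by simpa using List.mem_takeWhile_imp hb
    exact hb'.symm
  rw [this, pvTW]

-- B side -----------------------------------------------------------------
def pvEmit : List Char → Int → List Int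
  | [], run => if run ≠ 0 then [run] else []
  | c :: t, run =>
    if c = '*' then pvEmit t (run + 1)
    else if run ≠ 0 then run :: pvEmit t 0 else pvEmit t 0

theorem pvFoldl_emit (cs : List Char) : ∀ (acc : List Int) (run : Int),
    (let p := cs.foldl pvStep (acc, run);
     if p.2 ≠ 0 then p.1 ++ [p.2] else p.1) = acc ++ pvEmit cs run := by
  induction cs with
  | nil => intro acc run; by_cases h : run = 0 <;> simp [pvEmit, h]
  | cons c t ih =>
    intro acc run
    simp only [List.foldl_cons]
    by_cases hc : c = '*'
    · rw [show pvStep (acc, run) c = (acc, run + 1) by simp [pvStep, hc]]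
      rw [ih acc (run + 1)]
      rw [show pvEmit (c :: t) run = pvEmit t (run + 1) by simp [pvEmit, hc]]
    · by_cases hr : run = 0
      · rw [show pvStep (acc, run) c = (acc, run) by simp [pvStep, hc, hr]]
        rw [ih acc run]
        rw [show pvEmit (c :: t) run = pvEmit t 0 by simp [pvEmit, hc, hr], hr]
      · rw [show pvStep (acc, run) c = (acc ++ [run], 0) by simp [pvStep, hc, hr]]
        rw [ih (acc ++ [run]) 0]
        rw [show pvEmit (c :: t) run = run :: pvEmit t 0 by simp [pvEmit, hc, hr]]
        simp

theorem pvEmit_eq_groups (cs : List Char) :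
    (∀ run : Int, 0 < run → pvEmit cs run
        = (run + (pvTW cs : Int)) :: pvGroups (cs.drop (pvTW cs)))
    ∧ pvEmit cs 0 = pvGroups cs := by
  induction cs with
  | nil =>
    constructor
    · intro run hrun
      simp [pvEmit, pvTW, pvGroups_nil_of_not_mem]
      omega
    · simp [pvEmit, pvGroups_nil_of_not_mem]
  | cons c t ih =>
    by_cases hc : c = '*'
    · subst hc
      have htw : pvTW ('*' :: t) = pvTW t + 1 := by simp [pvTW, List.takeWhile_cons]
      have hdrop : ('*' :: t).drop (pvTW ('*' :: t)) = t.drop (pvTW t) := by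
        rw [htw]; simp
      constructor
      · intro run hrun
        rw [show pvEmit ('*' :: t) run = pvEmit t (run + 1) by simp [pvEmit]]
        rw [ih.1 (run + 1) (by omega), htw,
          show List.drop (pvTW t + 1) ('*' :: t) = List.drop (pvTW t) t from List.drop_succ_cons ..]
        congr 1
        push_cast
        ring
      · rw [show pvEmit ('*' :: t) 0 = pvEmit t 1 by simp [pvEmit]]
        rw [ih.1 1 (by omega), pvGroups_cons_star]
        norm_cast
    · have htw : pvTW (c :: t) = 0 := by simp [pvTW, List.takeWhile_cons, hc]
      constructor
      · intro run hrun
        rw [show pvEmit (c :: t) run = run :: pvEmit t 0 by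
          have hne : run ≠ 0 := by omega
          simp [pvEmit, hc, hne]]
        rw [ih.2, htw]
        simp [pvGroups_cons_of_ne c t hc]
      · rw [show pvEmit (c :: t) 0 = pvEmit t 0 by simp [pvEmit, hc]]
        rw [ih.2, pvGroups_cons_of_ne c t hc]

theorem pvAlt (row : String) :
    row_reader_alt row
      = if pvGroups row.toList = [] then [0] else pvGroups row.toList := by
  have h := pvFoldl_emit row.toList [] 0
  simp only at h
  rw [(pvEmit_eq_groups row.toList).2, List.nil_append] at h
  simp only [row_reader_alt]
  rw [h]

-- A side: primitives ------------------------------------------------------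
theorem pvFindGo (cs : List Char) : ∀ k : Nat,
    PySem.Chars.find.go ['*'] cs k
      = if '*' ∈ cs then ((k + (cs.takeWhile (· ≠ '*')).length : Nat) : Int) else -1 := by
  induction cs with
  | nil => intro k; simp [PySem.Chars.find.go]
  | cons c t ih =>
    intro k
    by_cases hc : c = '*'
    · subst hc
      rw [PySem.Chars.find.go]
      simp [List.takeWhile_cons, List.isPrefixOf]
    · rw [PySem.Chars.find.go]
      have hpre : List.isPrefixOf ['*'] (c :: t) = false := by
        simp [List.isPrefixOf, Ne.symm hc]
      rw [hpre]
      simp only [Bool.false_eq_true, if_false, ih (k + 1)]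
      have htk : ((c :: t).takeWhile (· ≠ '*')).length = (t.takeWhile (· ≠ '*')).length + 1 := by
        simp [List.takeWhile_cons, hc]
      by_cases ht : '*' ∈ t
      · have hmem : '*' ∈ c :: t := List.mem_cons_of_mem _ ht
        rw [if_pos ht, if_pos hmem, htk]
        congr 1
        omega
      · have hmem : '*' ∉ c :: t := by
          simp only [List.mem_cons, not_or]
          exact ⟨fun h => hc h.symm, ht⟩
        rw [if_neg ht, if_neg hmem]

theorem pvFind (cs : List Char) :
    PySem.Chars.find cs ['*']
      = if '*' ∈ cs then (((cs.takeWhile (· ≠ '*')).length : Nat) : Int) else -1 := by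
  rw [show PySem.Chars.find cs ['*'] = PySem.Chars.find.go ['*'] cs 0 from rfl, pvFindGo]
  simp

theorem pvCountGo (cs : List Char) : ∀ (fuel acc : Nat), cs.length ≤ fuel →
    PySem.Chars.count.go ['*'] fuel cs acc = acc + cs.count '*' := by
  induction cs with
  | nil =>
    intro fuel acc _
    cases fuel <;> simp [PySem.Chars.count.go]
  | cons c t ih =>
    intro fuel acc hf
    cases fuel with
    | zero => simp at hf
    | succ fuel =>
      rw [PySem.Chars.count.go]
      by_cases hc : c = '*'
      · subst hc
        have hpre : List.isPrefixOf ['*'] ('*' :: t) = true := by simp [List.isPrefixOf]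
        rw [hpre, if_pos rfl]
        rw [show List.drop (['*'] : List Char).length ('*' :: t) = t by simp]
        rw [ih fuel (acc + 1) (by simpa using hf), List.count_cons_self]
        omega
      · have hpre : List.isPrefixOf ['*'] (c :: t) = false := by
          simp [List.isPrefixOf, Ne.symm hc]
        rw [hpre]
        simp only [Bool.false_eq_true, if_false]
        rw [ih fuel acc (by simpa using hf)]
        simp [List.count_cons, hc, Ne.symm hc]

theorem pvCount (cs : List Char) : PySem.Chars.count cs ['*'] = cs.count '*' := by
  rw [PySem.Chars.count]
  simp only [List.isEmpty_cons, Bool.false_eq_true, if_false]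
  rw [pvCountGo cs cs.length 0 (le_refl _)]
  omega

theorem pvScanAux (cs : List Char) : ∀ (n i : Nat), cs.length - i ≤ n →
    OG_scan cs i = i + pvTW (cs.drop i) := by
  intro n
  induction n with
  | zero =>
    intro i hi
    have : cs.length ≤ i := by omega
    rw [OG_scan]
    simp [this, List.drop_eq_nil_of_le this, pvTW, Nat.not_lt.mpr this]
  | succ n ih =>
    intro i hi
    rw [OG_scan]
    by_cases h : i < cs.length
    · rw [dif_pos h]
      have hdrop := List.drop_eq_getElem_cons h
      by_cases hs : cs[i] = '*'
      · rw [if_pos hs, ih (i + 1) (by omega)]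
        have : pvTW (cs.drop i) = 1 + pvTW (cs.drop (i + 1)) := by
          rw [hdrop]
          simp [pvTW, List.takeWhile_cons, hs, Nat.add_comm]
        omega
      · rw [if_neg hs]
        have : pvTW (cs.drop i) = 0 := by
          rw [hdrop]; simp [pvTW, List.takeWhile_cons, hs]
        omega
    · rw [dif_neg h]
      have : cs.length ≤ i := by omega
      simp [List.drop_eq_nil_of_le this, pvTW]

theorem pvScan (cs : List Char) (i : Nat) : OG_scan cs i = i + pvTW (cs.drop i) := by
  exact pvScanAux cs cs.length i (by omega)

theorem pvFindFrom (cs : List Char) (k : Nat) (hk : k ≤ cs.length) :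
    PySem.Chars.findFrom cs ['*'] (k : Int)
      = if '*' ∈ cs.drop k then ((k + ((cs.drop k).takeWhile (· ≠ '*')).length : Nat) : Int)
        else -1 := by
  rw [PySem.Chars.findFrom_natCast cs ['*'] k hk, pvFind]
  by_cases h : '*' ∈ cs.drop k
  · rw [if_pos h, if_pos h]
    rw [if_neg (by omega)]
    push_cast
    ring
  · simp [h]

-- groupsize at a star position k computes the run length at k
theorem pvGroupsize (cs : List Char) (k : Nat) (hk : k < cs.length) (hs : cs[k] = '*') :
    OG_groupsize k cs = pvTW (cs.drop k) := by
  have hdrop := pvDrop_cons cs k hk hs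
  have hmem : '*' ∈ cs.drop k := by rw [hdrop]; exact List.mem_cons_self ..
  have htw : ((cs.drop k).takeWhile (· ≠ '*')).length = 0 := by
    rw [hdrop]; simp [List.takeWhile_cons]
  rw [OG_groupsize]
  simp only [pvFindFrom cs k (le_of_lt hk), hmem, if_pos, htw, Nat.add_zero,
    Int.toNat_natCast, pvScan]
  omega

-- the main loop invariant
theorem pvLoop (cs : List Char) : ∀ (fuel k run : Nat) (acc : List Int),
    cs.length - k < fuel → (hk : k < cs.length) → cs[k] = '*' →
    run + (cs.drop k).count '*' = cs.count '*' →
    row_loop cs (cs.count '*') fuel k run acc = acc ++ pvGroups (cs.drop k) := by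
  intro fuel
  induction fuel with
  | zero => intro k run acc hfuel hk _ _; omega
  | succ fuel ih =>
    intro k run acc hfuel hk hs hrun
    have hdrop := pvDrop_cons cs k hk hs
    set ℓ := pvTW (cs.drop k) with hℓdef
    have hℓpos : 1 ≤ ℓ := by
      rw [hℓdef, hdrop]; simp [pvTW, List.takeWhile_cons]
    have hsplit : (cs.drop k).count '*' = ℓ + (cs.drop (k + ℓ)).count '*' := by
      rw [pvCount_split (cs.drop k), ← hℓdef, List.drop_drop]
    have hgroups : pvGroups (cs.drop k) = (ℓ : Int) :: pvGroups (cs.drop (k + ℓ)) := by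
      rw [hdrop, pvGroups_cons_star]
      have h1 : ℓ = 1 + pvTW (cs.drop (k + 1)) := by
        rw [hℓdef, hdrop]; simp [pvTW, List.takeWhile_cons, Nat.add_comm]
      have h2 : (cs.drop (k + 1)).drop (pvTW (cs.drop (k + 1))) = cs.drop (k + ℓ) := by
        rw [List.drop_drop, h1]; congr 1; omega
      rw [h2, ← h1]
    rw [row_loop]
    simp only [if_pos hk, pvGroupsize cs k hk hs, ← hℓdef]
    by_cases hdone : run + ℓ = cs.count '*'
    · rw [if_pos hdone]
      have hnostar : '*' ∉ cs.drop (k + ℓ) := by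
        rw [← List.count_eq_zero]
        omega
      rw [hgroups, pvGroups_nil_of_not_mem _ hnostar]
    · rw [if_neg hdone]
      have hstar : '*' ∈ cs.drop (k + ℓ) := by
        by_contra hno
        rw [← List.count_eq_zero] at hno
        omega
      have hkl : k + ℓ ≤ cs.length := by
        by_contra hgt
        rw [List.drop_eq_nil_of_le (by omega)] at hstar
        simp at hstar
      rw [pvFindFrom cs (k + ℓ) hkl, if_pos hstar, Int.toNat_natCast]
      set t0 := ((cs.drop (k + ℓ)).takeWhile (· ≠ '*')).length with ht0
      have hdw : cs.drop (k + ℓ + t0) = (cs.drop (k + ℓ)).dropWhile (· ≠ '*') := by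
        rw [pvDropWhile_eq_drop, ← ht0, List.drop_drop]
      obtain ⟨t, htcons⟩ := pvDropWhile_cons_star (cs.drop (k + ℓ)) hstar
      have hcons' : cs.drop (k + ℓ + t0) = '*' :: t := by rw [hdw, htcons]
      obtain ⟨hklt, hstar'⟩ := pvDrop_head cs (k + ℓ + t0) t hcons'
      have hcnt : (cs.drop (k + ℓ + t0)).count '*' = (cs.drop (k + ℓ)).count '*' := by
        rw [hdw, (pvMem_dropWhile (cs.drop (k + ℓ)) hstar).2]
      rw [ih (k + ℓ + t0) (run + ℓ) (acc ++ [(ℓ : Int)]) (by omega) hklt hstar' (by omega)]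
      rw [hgroups]
      have : pvGroups (cs.drop (k + ℓ + t0)) = pvGroups (cs.drop (k + ℓ)) := by
        rw [hdw, pvGroups_dropWhile]
      rw [this]
      simp

-- ===== VERDICT (by name: the statement is the Claim_ definition above) =====
theorem row_reader_spec : Claim_equal_row_reader := by
  intro row _
  unfold Spec_row_reader
  rw [pvAlt]
  set cs := row.toList with hcs
  simp only [row_reader, pvCount, ← hcs]
  by_cases h0 : cs.count '*' = 0
  · rw [if_pos h0]
    have : '*' ∉ cs := by rwa [← List.count_eq_zero]
    rw [pvGroups_nil_of_not_mem _ this]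
    simp
  · rw [if_neg h0]
    have hmem : '*' ∈ cs := by
      rw [← List.count_pos_iff]; omega
    rw [pvFind]
    simp only [hmem, if_pos, Int.toNat_natCast]
    set k0 := (cs.takeWhile (· ≠ '*')).length with hk0
    have hdw : cs.drop k0 = cs.dropWhile (· ≠ '*') := by
      rw [pvDropWhile_eq_drop, hk0]
    obtain ⟨t, htcons⟩ := pvDropWhile_cons_star cs hmem
    have hcons' : cs.drop k0 = '*' :: t := by rw [hdw, htcons]
    obtain ⟨hklt, hstar'⟩ := pvDrop_head cs k0 t hcons'
    have hcnt : (cs.drop k0).count '*' = cs.count '*' := by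
      rw [hdw, (pvMem_dropWhile cs hmem).2]
    rw [pvLoop cs (cs.length + 1) k0 0 [] (by omega) hklt hstar' (by omega)]
    rw [List.nil_append]
    have hg : pvGroups (cs.drop k0) = pvGroups cs := by
      rw [hdw, pvGroups_dropWhile]
    rw [hg, if_neg (pvGroups_ne_nil cs hmem)]
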